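-- pv_equiv track=rewrite | github.com/s41m1r/elg-with-ai-experiment | scripts/generate_tables.py | table_m1_by_task
-- ===== SOURCE A (Python) =====
-- TASKS = ["t1", "t2", "t3", "t4", "t5", "t6"]
--
-- TASK_LABELS = {
--     "t1": "ICU Pathway",
--     "t2": "Medication Admin.",
--     "t3": "Sepsis Trajectory",
--     "t4": "Lab-Order Cycle",
--     "t5": "ED Flow",
--     "t6": "Diagnosis Pathway",
-- }
--
-- LLMS = ["gpt4o", "claude", "llama3"]
--
-- STRATEGIES = ["naive", "zero_shot", "schema_aware", "few_shot"]
--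
-- def table_m1_by_task(agg: dict) -> str:
--     """Regenerate Table 2: M1 executability (%) by task."""
--     lines = [
--         "% === Table: M1 Executability by Task ===",
--         "\\begin{table}[t]",
--         "  \\caption{M1 Executability (\\%) by clinical process task "
--         "(36 runs each).}\\label{tab:m1task}",
--         "  \\centering",
--         "  \\begin{tabular}{@{}llcc@{}}",
--         "    \\toprule",
--         "    \\textbf{Task} & \\textbf{Process} & \\textbf{M1 Pass} "
--         "& \\textbf{Rate} \\\\",
--         "    \\midrule",
--     ]
--
--     grand_pass, grand_total = 0, 0
--     for task in TASKS:
--         pass_count = sum(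
--             agg.get((task, llm, strategy), {}).get("m1_pass", 0) or 0
--             for llm in LLMS for strategy in STRATEGIES
--         )
--         total_count = sum(
--             agg.get((task, llm, strategy), {}).get("m1_total", 0) or 0
--             for llm in LLMS for strategy in STRATEGIES
--         )
--         pct = int(round(pass_count / total_count * 100)) if total_count else 0
--         bold = "\\textbf{" if pct == 100 else ""
--         endb = "}" if pct == 100 else ""
--         lines.append(
--             f"    {task.upper()} & {TASK_LABELS[task]} & "
--             f"{pass_count}/{total_count} & {bold}{pct}\\%{endb} \\\\"
--         )
--         grand_pass  += pass_count
--         grand_total += total_count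
--
--     gp = int(round(grand_pass / grand_total * 100)) if grand_total else 0
--     lines += [
--         "    \\midrule",
--         f"    \\textbf{{Total}} & & {grand_pass}/{grand_total} & {gp}\\% \\\\",
--         "    \\bottomrule",
--         "  \\end{tabular}",
--         "\\end{table}",
--         "",
--     ]
--     return "\n".join(lines)
-- ===== SOURCE B (Python) =====
-- TASKS = ["t1", "t2", "t3", "t4", "t5", "t6"]
--
-- TASK_LABELS = {
--     "t1": "ICU Pathway",
--     "t2": "Medication Admin.",
--     "t3": "Sepsis Trajectory",
--     "t4": "Lab-Order Cycle",
--     "t5": "ED Flow",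
--     "t6": "Diagnosis Pathway",
-- }
--
-- LLMS = ["gpt4o", "claude", "llama3"]
--
-- STRATEGIES = ["naive", "zero_shot", "schema_aware", "few_shot"]
--
--
-- def table_m1_by_task(agg: dict) -> str:
--     """Regenerate Table 2: M1 executability (%) by task."""
--     # One scatter pass over agg builds per-task (pass, total) accumulators,
--     # instead of 72 fixed lookups.
--     acc = {task: [0, 0] for task in TASKS}
--     for (task, llm, strategy), rec in agg.items():
--         if task in acc and llm in LLMS and strategy in STRATEGIES:
--             cell = acc[task]
--             cell[0] += rec.get("m1_pass", 0) or 0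
--             cell[1] += rec.get("m1_total", 0) or 0
--
--     rows = []
--     for task in TASKS:
--         p, t = acc[task]
--         pct = int(round(p / t * 100)) if t else 0
--         bold = "\\textbf{" if pct == 100 else ""
--         endb = "}" if pct == 100 else ""
--         rows.append(
--             f"    {task.upper()} & {TASK_LABELS[task]} & "
--             f"{p}/{t} & {bold}{pct}\\%{endb} \\\\"
--         )
--
--     grand_pass = sum(cell[0] for cell in acc.values())
--     grand_total = sum(cell[1] for cell in acc.values())
--     gp = int(round(grand_pass / grand_total * 100)) if grand_total else 0
--
--     return "\n".join(
--         [
--             "% === Table: M1 Executability by Task ===",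
--             "\\begin{table}[t]",
--             "  \\caption{M1 Executability (\\%) by clinical process task "
--             "(36 runs each).}\\label{tab:m1task}",
--             "  \\centering",
--             "  \\begin{tabular}{@{}llcc@{}}",
--             "    \\toprule",
--             "    \\textbf{Task} & \\textbf{Process} & \\textbf{M1 Pass} "
--             "& \\textbf{Rate} \\\\",
--             "    \\midrule",
--         ]
--         + rows
--         + [
--             "    \\midrule",
--             f"    \\textbf{{Total}} & & {grand_pass}/{grand_total} & {gp}\\% \\\\",
--             "    \\bottomrule",
--             "  \\end{tabular}",
--             "\\end{table}",
--             "",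
--         ]
--     )
-- ===== Notes on version B (the rewrite author's own statement) =====
-- stated objective: alternative
-- what changed: B replaces A's 72 fixed dict lookups (12 per task) by a single scatter pass over agg.items() that accumulates per-task (pass,total) pairs, then formats rows and derives the grand totals from the accumulator values. Pre_ excludes only association lists with duplicate (task,llm,strategy) keys, which represent no Python dict.
import Mathlib
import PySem

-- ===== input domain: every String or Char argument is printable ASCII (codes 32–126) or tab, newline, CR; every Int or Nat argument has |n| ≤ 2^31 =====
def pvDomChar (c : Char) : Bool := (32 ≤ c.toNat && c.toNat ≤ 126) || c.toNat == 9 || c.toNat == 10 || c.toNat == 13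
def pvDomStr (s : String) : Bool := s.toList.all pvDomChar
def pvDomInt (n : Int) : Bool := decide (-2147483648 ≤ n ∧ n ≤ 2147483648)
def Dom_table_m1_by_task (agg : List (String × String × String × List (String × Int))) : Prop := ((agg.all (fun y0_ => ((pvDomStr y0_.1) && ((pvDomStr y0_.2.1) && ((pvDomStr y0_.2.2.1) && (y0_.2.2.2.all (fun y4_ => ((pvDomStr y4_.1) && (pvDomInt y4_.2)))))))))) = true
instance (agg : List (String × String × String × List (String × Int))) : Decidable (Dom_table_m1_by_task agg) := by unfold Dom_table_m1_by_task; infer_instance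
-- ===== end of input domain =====

-- B replaces A's 72 fixed dict lookups by one scatter pass over agg that builds
-- per-task (pass, total) accumulators (objective: alternative data structure / traversal).

-- Shared module-level constants of the Python file.
def pvTASKS : List String := ["t1", "t2", "t3", "t4", "t5", "t6"]
def pvLABELS : List (String × String) :=
  [("t1", "ICU Pathway"), ("t2", "Medication Admin."), ("t3", "Sepsis Trajectory"),
   ("t4", "Lab-Order Cycle"), ("t5", "ED Flow"), ("t6", "Diagnosis Pathway")]
def pvLLMS : List String := ["gpt4o", "claude", "llama3"]
def pvSTRATEGIES : List String := ["naive", "zero_shot", "schema_aware", "few_shot"]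

-- Python `x or 0` on an int x.
def pvOr0 (x : Int) : Int := if x = 0 then 0 else x

-- `rec.get(f, 0) or 0` (both Pythons contain this very expression).
def pvRecGet (rec : List (String × Int)) (f : String) : Int :=
  pvOr0 (PySem.Dict.getD (PySem.Dict.mk rec) f 0)

-- ---- exact model of Python's `int(round(p / t * 100))` for t ≠ 0 ----
-- p / t is IEEE-754 double true division (correctly rounded), * 100 a second
-- double rounding, round() ties-to-even; modelled exactly with integers
-- (|p|, |t| ≤ 12·2^31 keeps every value normal and far from overflow).
-- round-half-even of n/d (n ≥ 0, d > 0)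
def pvRne (n d : Nat) : Nat :=
  let q := n / d
  let r := n % d
  if 2 * r < d then q else if d < 2 * r then q + 1 else if q % 2 = 0 then q else q + 1

-- n/d ≥ 2^L ?
def pvGepow (n d : Nat) (L : Int) : Bool :=
  if 0 ≤ L then d * 2 ^ L.toNat ≤ n else d ≤ n * 2 ^ (-L).toNat

-- round-half-even of n·2^k/d
def pvRneShift (n d : Nat) (k : Int) : Nat :=
  if 0 ≤ k then pvRne (n * 2 ^ k.toNat) d else pvRne n (d * 2 ^ (-k).toNat)

def pvPct (p t : Int) : Int :=
  let n := p.natAbs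
  let d := t.natAbs
  if n = 0 then 0 else
  let s : Int := if (p < 0) = (t < 0) then 1 else -1
  -- nearest double to n/d as m/2^k with 2^52 ≤ m < 2^53
  let L : Int := (PySem.Int.bitLength p : Int) - (PySem.Int.bitLength t : Int)
  let E : Int := if pvGepow n d L then L else L - 1
  let k : Int := 52 - E
  let m := pvRneShift n d k
  let mk' : Nat × Int := if m = 2 ^ 53 then (2 ^ 52, k - 1) else (m, k)
  -- second rounding: the double nearest to (m·100)/2^k
  let N := mk'.1 * 100
  let sh : Nat := PySem.Int.bitLength (N : Int) - 53
  let m1 := pvRne N (2 ^ sh)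
  let m1sh : Nat × Nat := if m1 = 2 ^ 53 then (2 ^ 52, sh + 1) else (m1, sh)
  -- round() of m1·2^(sh-k), ties to even
  let j : Int := (m1sh.2 : Int) - mk'.2
  let r : Nat := if 0 ≤ j then m1sh.1 * 2 ^ j.toNat else pvRne m1sh.1 (2 ^ (-j).toNat)
  s * (r : Int)

-- ===== PORT A =====
-- `agg.get((task, llm, strategy), {}).get(f, 0) or 0`
def pvAGet (agg : List (String × String × String × List (String × Int)))
    (key : String × String × String) (f : String) : Int :=
  match (PySem.Dict.mk (agg.map (fun e => ((e.1, e.2.1, e.2.2.1), e.2.2.2)))).get? key with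
  | some rec => pvRecGet rec f
  | none => pvOr0 (PySem.Dict.getD (PySem.Dict.empty : PySem.Dict String Int) f 0)

def table_m1_by_task (agg : List (String × String × String × List (String × Int))) : String :=
  let lines : List String :=
    ["% === Table: M1 Executability by Task ===",
     "\\begin{table}[t]",
     "  \\caption{M1 Executability (\\%) by clinical process task (36 runs each).}\\label{tab:m1task}",
     "  \\centering",
     "  \\begin{tabular}{@{}llcc@{}}",
     "    \\toprule",
     "    \\textbf{Task} & \\textbf{Process} & \\textbf{M1 Pass} & \\textbf{Rate} \\\\",
     "    \\midrule"]
  let res := pvTASKS.foldl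
    (fun (st : List String × Int × Int) task =>
      let pass_count :=
        (pvLLMS.flatMap (fun llm => pvSTRATEGIES.map (fun strategy =>
          pvAGet agg (task, llm, strategy) "m1_pass"))).sum
      let total_count :=
        (pvLLMS.flatMap (fun llm => pvSTRATEGIES.map (fun strategy =>
          pvAGet agg (task, llm, strategy) "m1_total"))).sum
      let pct := if total_count ≠ 0 then pvPct pass_count total_count else 0
      let bold := if pct = 100 then "\\textbf{" else ""
      let endb := if pct = 100 then "}" else ""
      -- TASK_LABELS[task]: every task ∈ TASKS is a key, so KeyError is unreachable
      let line := "    " ++ PySem.Str.upper task ++ " & "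
        ++ PySem.Dict.getD (PySem.Dict.mk pvLABELS) task "" ++ " & "
        ++ PySem.Int.toStr pass_count ++ "/" ++ PySem.Int.toStr total_count ++ " & "
        ++ bold ++ PySem.Int.toStr pct ++ "\\%" ++ endb ++ " \\\\"
      (st.1 ++ [line], st.2.1 + pass_count, st.2.2 + total_count))
    (lines, 0, 0)
  let gp := if res.2.2 ≠ 0 then pvPct res.2.1 res.2.2 else 0
  PySem.Str.join "\n"
    (res.1 ++
     ["    \\midrule",
      "    \\textbf{Total} & & " ++ PySem.Int.toStr res.2.1 ++ "/" ++ PySem.Int.toStr res.2.2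
        ++ " & " ++ PySem.Int.toStr gp ++ "\\% \\\\",
      "    \\bottomrule",
      "  \\end{tabular}",
      "\\end{table}",
      ""])

-- ===== PORT B =====
def table_m1_by_task_alt (agg : List (String × String × String × List (String × Int))) : String :=
  -- acc = {task: [0, 0] for task in TASKS}
  let acc0 : PySem.Dict String (Int × Int) :=
    pvTASKS.foldl (fun d task => d.insert task (0, 0)) PySem.Dict.empty
  -- one scatter pass over agg.items()
  let acc := agg.foldl
    (fun acc e =>
      if acc.contains e.1 && pvLLMS.contains e.2.1 && pvSTRATEGIES.contains e.2.2.1 then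
        let cell := acc.getD e.1 (0, 0)  -- acc[task]: key present since `task in acc`
        acc.insert e.1 (cell.1 + pvRecGet e.2.2.2 "m1_pass", cell.2 + pvRecGet e.2.2.2 "m1_total")
      else acc)
    acc0
  let rows := pvTASKS.map (fun task =>
    let cell := acc.getD task (0, 0)  -- p, t = acc[task]: key always present
    let pct := if cell.2 ≠ 0 then pvPct cell.1 cell.2 else 0
    let bold := if pct = 100 then "\\textbf{" else ""
    let endb := if pct = 100 then "}" else ""
    "    " ++ PySem.Str.upper task ++ " & "
      ++ PySem.Dict.getD (PySem.Dict.mk pvLABELS) task "" ++ " & "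
      ++ PySem.Int.toStr cell.1 ++ "/" ++ PySem.Int.toStr cell.2 ++ " & "
      ++ bold ++ PySem.Int.toStr pct ++ "\\%" ++ endb ++ " \\\\")
  let grand_pass := (acc.values.map (fun cell => cell.1)).sum
  let grand_total := (acc.values.map (fun cell => cell.2)).sum
  let gp := if grand_total ≠ 0 then pvPct grand_pass grand_total else 0
  PySem.Str.join "\n"
    (["% === Table: M1 Executability by Task ===",
      "\\begin{table}[t]",
      "  \\caption{M1 Executability (\\%) by clinical process task (36 runs each).}\\label{tab:m1task}",
      "  \\centering",
      "  \\begin{tabular}{@{}llcc@{}}",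
      "    \\toprule",
      "    \\textbf{Task} & \\textbf{Process} & \\textbf{M1 Pass} & \\textbf{Rate} \\\\",
      "    \\midrule"]
     ++ rows ++
     ["    \\midrule",
      "    \\textbf{Total} & & " ++ PySem.Int.toStr grand_pass ++ "/" ++ PySem.Int.toStr grand_total
        ++ " & " ++ PySem.Int.toStr gp ++ "\\% \\\\",
      "    \\bottomrule",
      "  \\end{tabular}",
      "\\end{table}",
      ""])

-- ===== PRECONDITION & SPEC =====
-- agg is a Python dict, so its (task, llm, strategy) keys are necessarily distinct;
-- Pre_ excludes association lists with duplicate keys, which represent no dict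
-- (A's first-match lookup vs B's full traversal would disagree there).
def Pre_table_m1_by_task (agg : List (String × String × String × List (String × Int))) : Prop :=
  (agg.map (fun e => (e.1, e.2.1, e.2.2.1))).Nodup
instance (agg : List (String × String × String × List (String × Int))) : Decidable (Pre_table_m1_by_task agg) := by unfold Pre_table_m1_by_task; infer_instance

def pvWitness_table_m1_by_task : (List (String × String × String × List (String × Int))) :=
  [("t1", "gpt4o", "naive", [("m1_pass", 30), ("m1_total", 36)]),
   ("t2", "claude", "few_shot", [("m1_pass", 36), ("m1_total", 36)])]

def Spec_table_m1_by_task (agg : List (String × String × String × List (String × Int))) (out : String) : Prop := out = table_m1_by_task_alt agg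
instance (agg : List (String × String × String × List (String × Int))) (out : String) : Decidable (Spec_table_m1_by_task agg out) := by unfold Spec_table_m1_by_task; infer_instance

-- ===== CLAIM (what is proved, stated in full; the proofs are below) =====
def Claim_equal_table_m1_by_task : Prop := ∀ (agg : List (String × String × String × List (String × Int))), Dom_table_m1_by_task agg → Pre_table_m1_by_task agg → Spec_table_m1_by_task agg (table_m1_by_task agg)

-- ===== LEMMAS AND PROOFS =====

-- the dict key of an agg entry
def pvKey (e : String × String × String × List (String × Int)) : String × String × String :=
  (e.1, e.2.1, e.2.2.1)

-- the 12 keys A looks up for one task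
def pvGrid (task : String) : List (String × String × String) :=
  pvLLMS.flatMap (fun llm => pvSTRATEGIES.map (fun s => (task, llm, s)))

-- scatter-sum of field f over entries of l that belong to task
def pvS (task f : String) (l : List (String × String × String × List (String × Int))) : Int :=
  (l.map (fun e =>
    if e.1 == task && pvLLMS.contains e.2.1 && pvSTRATEGIES.contains e.2.2.1 then
      pvRecGet e.2.2.2 f else 0)).sum

def pvM (a b c d e f : Int × Int) : PySem.Dict String (Int × Int) :=
  PySem.Dict.mk [("t1", a), ("t2", b), ("t3", c), ("t4", d), ("t5", e), ("t6", f)]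

lemma pvAGet_nil (key : String × String × String) (f : String) : pvAGet [] key f = 0 := rfl

lemma pvAGet_cons (e : String × String × String × List (String × Int)) l key f :
    pvAGet (e :: l) key f =
      if pvKey e == key then pvRecGet e.2.2.2 f else pvAGet l key f := by
  simp only [pvAGet, List.map_cons, PySem.Dict.get?_mk_cons, pvKey]
  by_cases h : ((e.1, e.2.1, e.2.2.1) == key) = true <;> simp [h]

lemma pvAGet_not_mem (l) (key : String × String × String) (f : String)
    (h : key ∉ l.map pvKey) : pvAGet l key f = 0 := by
  induction l with
  | nil => exact pvAGet_nil key f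
  | cons e l ih =>
    simp only [List.map_cons, List.mem_cons, not_or] at h
    rw [pvAGet_cons, if_neg (by simp only [beq_iff_eq]; exact fun hh => h.1 hh.symm)]
    exact ih h.2

lemma mem_pvGrid (q : String × String × String) (task : String) :
    q ∈ pvGrid task ↔ q.1 = task ∧ q.2.1 ∈ pvLLMS ∧ q.2.2 ∈ pvSTRATEGIES := by
  obtain ⟨x, y, z⟩ := q
  simp [pvGrid, List.mem_flatMap, eq_comm]
  tauto

lemma nodup_pvGrid (task : String) : (pvGrid task).Nodup := by
  simp [pvGrid, pvLLMS, pvSTRATEGIES, List.nodup_cons, List.mem_cons]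

lemma sum_pvAGet_cons (qs : List (String × String × String)) (hq : qs.Nodup)
    (e : String × String × String × List (String × Int)) (l) (f)
    (he : pvKey e ∉ l.map pvKey) :
    (qs.map (fun q => pvAGet (e :: l) q f)).sum
      = (if pvKey e ∈ qs then pvRecGet e.2.2.2 f else 0)
        + (qs.map (fun q => pvAGet l q f)).sum := by
  induction qs with
  | nil => simp
  | cons q qs ih =>
    simp only [List.nodup_cons] at hq
    by_cases hk : pvKey e = q
    · subst hk
      have h1 : pvAGet (e :: l) (pvKey e) f = pvRecGet e.2.2.2 f := by
        rw [pvAGet_cons, if_pos (by simp)]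
      have h2 : (qs.map (fun q => pvAGet (e :: l) q f)) = qs.map (fun q => pvAGet l q f) := by
        refine List.map_congr_left fun q' hq' => ?_
        rw [pvAGet_cons, if_neg (by simp only [beq_iff_eq]; exact fun hh => hq.1 (by rw [hh]; exact hq'))]
      have h3 : pvAGet l (pvKey e) f = 0 := pvAGet_not_mem l _ f he
      simp only [List.map_cons, List.sum_cons, h1, h2, h3, List.mem_cons, true_or, if_true]
      ring
    · have h1 : pvAGet (e :: l) q f = pvAGet l q f := by
        rw [pvAGet_cons, if_neg (by simpa using hk)]
      have hmem : (pvKey e ∈ q :: qs) ↔ (pvKey e ∈ qs) := by simp [hk]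
      simp only [List.map_cons, List.sum_cons, h1, hmem, ih hq.2]
      ring

lemma sum_pvAGet_eq_pvS (task f : String) (l)
    (h : (l.map pvKey).Nodup) :
    ((pvGrid task).map (fun q => pvAGet l q f)).sum = pvS task f l := by
  induction l with
  | nil => simp [pvS, pvAGet_nil]
  | cons e l ih =>
    simp only [List.map_cons, List.nodup_cons] at h
    rw [sum_pvAGet_cons _ (nodup_pvGrid task) _ _ _ h.1, ih h.2]
    have hmem : (pvKey e ∈ pvGrid task)
        ↔ (e.1 == task && pvLLMS.contains e.2.1 && pvSTRATEGIES.contains e.2.2.1) = true := by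
      rw [mem_pvGrid]
      simp [pvKey, and_assoc]
    simp only [pvS, List.map_cons, List.sum_cons]
    by_cases hc : (e.1 == task && pvLLMS.contains e.2.1 && pvSTRATEGIES.contains e.2.2.1) = true
    · rw [if_pos (hmem.mpr hc), if_pos hc]
    · rw [if_neg (fun hm => hc (hmem.mp hm)), if_neg hc]

lemma gridify (task : String) (g : String × String × String → Int) :
    pvLLMS.flatMap (fun llm => pvSTRATEGIES.map (fun strategy => g (task, llm, strategy)))
      = (pvGrid task).map g := by
  simp [pvGrid, List.map_flatMap, Function.comp_def, List.map_map]

lemma pvS_cons (task f : String) (x l) :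
    pvS task f (x :: l)
      = (if x.1 == task && pvLLMS.contains x.2.1 && pvSTRATEGIES.contains x.2.2.1 then
          pvRecGet x.2.2.2 f else 0) + pvS task f l := by
  simp [pvS]


lemma contains_pvM (a b c d e f : Int × Int) (s : String) :
    (pvM a b c d e f).contains s
      = ("t1" == s || ("t2" == s || ("t3" == s || ("t4" == s || ("t5" == s || "t6" == s))))) := by
  simp [pvM, PySem.Dict.contains_mk]

lemma scatter_inv (l : List (String × String × String × List (String × Int)))
    (a b c d e f : Int × Int) :
    l.foldl
      (fun acc e =>
        if acc.contains e.1 && pvLLMS.contains e.2.1 && pvSTRATEGIES.contains e.2.2.1 then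
          let cell := acc.getD e.1 (0, 0)
          acc.insert e.1 (cell.1 + pvRecGet e.2.2.2 "m1_pass", cell.2 + pvRecGet e.2.2.2 "m1_total")
        else acc)
      (pvM a b c d e f)
    = pvM (a.1 + pvS "t1" "m1_pass" l, a.2 + pvS "t1" "m1_total" l)
          (b.1 + pvS "t2" "m1_pass" l, b.2 + pvS "t2" "m1_total" l)
          (c.1 + pvS "t3" "m1_pass" l, c.2 + pvS "t3" "m1_total" l)
          (d.1 + pvS "t4" "m1_pass" l, d.2 + pvS "t4" "m1_total" l)
          (e.1 + pvS "t5" "m1_pass" l, e.2 + pvS "t5" "m1_total" l)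
          (f.1 + pvS "t6" "m1_pass" l, f.2 + pvS "t6" "m1_total" l) := by
  induction l generalizing a b c d e f with
  | nil => simp [pvS]
  | cons x l ih =>
    obtain ⟨x1, x2, x3, x4⟩ := x
    rw [List.foldl_cons]
    by_cases hL : pvLLMS.contains x2 = true
    case neg =>
      have hL' : x2 ∉ pvLLMS := by simpa using hL
      rw [if_neg (by simp [hL']), ih]
      simp [pvS_cons, hL']
    case pos =>
    by_cases hS : pvSTRATEGIES.contains x3 = true
    case neg =>
      have hS' : x3 ∉ pvSTRATEGIES := by simpa using hS
      rw [if_neg (by simp [hS']), ih]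
      simp [pvS_cons, hS']
    case pos =>
    by_cases h1 : x1 = "t1"
    · subst h1
      rw [if_pos (by simp [contains_pvM]; exact ⟨by simpa using hL, by simpa using hS⟩)]
      show l.foldl _ (pvM (a.1 + pvRecGet x4 "m1_pass", a.2 + pvRecGet x4 "m1_total") b c d e f) = _
      rw [ih]
      have hLm : x2 ∈ pvLLMS := by simpa using hL
      have hSm : x3 ∈ pvSTRATEGIES := by simpa using hS
      simp only [pvS_cons]
      simp only [pvM, PySem.Dict.mk.injEq, List.cons.injEq, Prod.mk.injEq]
      simp [hLm, hSm]
      and_intros <;> ring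
    by_cases h2 : x1 = "t2"
    · subst h2
      rw [if_pos (by simp [contains_pvM]; exact ⟨by simpa using hL, by simpa using hS⟩)]
      show l.foldl _ (pvM a (b.1 + pvRecGet x4 "m1_pass", b.2 + pvRecGet x4 "m1_total") c d e f) = _
      rw [ih]
      have hLm : x2 ∈ pvLLMS := by simpa using hL
      have hSm : x3 ∈ pvSTRATEGIES := by simpa using hS
      simp only [pvS_cons]
      simp only [pvM, PySem.Dict.mk.injEq, List.cons.injEq, Prod.mk.injEq]
      simp [hLm, hSm]
      and_intros <;> ring
    by_cases h3 : x1 = "t3"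
    · subst h3
      rw [if_pos (by simp [contains_pvM]; exact ⟨by simpa using hL, by simpa using hS⟩)]
      show l.foldl _ (pvM a b (c.1 + pvRecGet x4 "m1_pass", c.2 + pvRecGet x4 "m1_total") d e f) = _
      rw [ih]
      have hLm : x2 ∈ pvLLMS := by simpa using hL
      have hSm : x3 ∈ pvSTRATEGIES := by simpa using hS
      simp only [pvS_cons]
      simp only [pvM, PySem.Dict.mk.injEq, List.cons.injEq, Prod.mk.injEq]
      simp [hLm, hSm]
      and_intros <;> ring
    by_cases h4 : x1 = "t4"
    · subst h4
      rw [if_pos (by simp [contains_pvM]; exact ⟨by simpa using hL, by simpa using hS⟩)]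
      show l.foldl _ (pvM a b c (d.1 + pvRecGet x4 "m1_pass", d.2 + pvRecGet x4 "m1_total") e f) = _
      rw [ih]
      have hLm : x2 ∈ pvLLMS := by simpa using hL
      have hSm : x3 ∈ pvSTRATEGIES := by simpa using hS
      simp only [pvS_cons]
      simp only [pvM, PySem.Dict.mk.injEq, List.cons.injEq, Prod.mk.injEq]
      simp [hLm, hSm]
      and_intros <;> ring
    by_cases h5 : x1 = "t5"
    · subst h5
      rw [if_pos (by simp [contains_pvM]; exact ⟨by simpa using hL, by simpa using hS⟩)]
      show l.foldl _ (pvM a b c d (e.1 + pvRecGet x4 "m1_pass", e.2 + pvRecGet x4 "m1_total") f) = _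
      rw [ih]
      have hLm : x2 ∈ pvLLMS := by simpa using hL
      have hSm : x3 ∈ pvSTRATEGIES := by simpa using hS
      simp only [pvS_cons]
      simp only [pvM, PySem.Dict.mk.injEq, List.cons.injEq, Prod.mk.injEq]
      simp [hLm, hSm]
      and_intros <;> ring
    by_cases h6 : x1 = "t6"
    · subst h6
      rw [if_pos (by simp [contains_pvM]; exact ⟨by simpa using hL, by simpa using hS⟩)]
      show l.foldl _ (pvM a b c d e (f.1 + pvRecGet x4 "m1_pass", f.2 + pvRecGet x4 "m1_total")) = _
      rw [ih]
      have hLm : x2 ∈ pvLLMS := by simpa using hL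
      have hSm : x3 ∈ pvSTRATEGIES := by simpa using hS
      simp only [pvS_cons]
      simp only [pvM, PySem.Dict.mk.injEq, List.cons.injEq, Prod.mk.injEq]
      simp [hLm, hSm]
      and_intros <;> ring
    have hc : (pvM a b c d e f).contains x1 = false := by
      rw [contains_pvM]
      simp only [Bool.or_eq_false_iff, beq_eq_false_iff_ne]
      exact ⟨fun h => h1 h.symm, fun h => h2 h.symm, fun h => h3 h.symm,
        fun h => h4 h.symm, fun h => h5 h.symm, fun h => h6 h.symm⟩
    rw [if_neg (by simp [hc]), ih]
    simp [pvS_cons, h1, h2, h3, h4, h5, h6]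

-- ===== VERDICT (by name: the statement is the Claim_ definition above) =====
lemma getD_pvM₁ (a b c d e f : Int × Int) : (pvM a b c d e f).getD "t1" (0,0) = a := rfl
lemma getD_pvM₂ (a b c d e f : Int × Int) : (pvM a b c d e f).getD "t2" (0,0) = b := rfl
lemma getD_pvM₃ (a b c d e f : Int × Int) : (pvM a b c d e f).getD "t3" (0,0) = c := rfl
lemma getD_pvM₄ (a b c d e f : Int × Int) : (pvM a b c d e f).getD "t4" (0,0) = d := rfl
lemma getD_pvM₅ (a b c d e f : Int × Int) : (pvM a b c d e f).getD "t5" (0,0) = e := rfl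
lemma getD_pvM₆ (a b c d e f : Int × Int) : (pvM a b c d e f).getD "t6" (0,0) = f := rfl
lemma values_pvM (a b c d e f : Int × Int) : (pvM a b c d e f).values = [a, b, c, d, e, f] := rfl
lemma acc0_eq : (pvTASKS.foldl (fun d task => d.insert task ((0:Int), (0:Int))) PySem.Dict.empty)
    = pvM (0,0) (0,0) (0,0) (0,0) (0,0) (0,0) := rfl

theorem table_m1_by_task_spec : Claim_equal_table_m1_by_task := by
  intro agg _ hpre
  unfold Spec_table_m1_by_task
  have hnd : (agg.map pvKey).Nodup := hpre
  have hp : ∀ task, (pvLLMS.flatMap (fun llm => pvSTRATEGIES.map (fun strategy =>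
      pvAGet agg (task, llm, strategy) "m1_pass"))).sum = pvS task "m1_pass" agg := fun task => by
    rw [gridify task (fun q => pvAGet agg q "m1_pass"), sum_pvAGet_eq_pvS _ _ _ hnd]
  have ht : ∀ task, (pvLLMS.flatMap (fun llm => pvSTRATEGIES.map (fun strategy =>
      pvAGet agg (task, llm, strategy) "m1_total"))).sum = pvS task "m1_total" agg := fun task => by
    rw [gridify task (fun q => pvAGet agg q "m1_total"), sum_pvAGet_eq_pvS _ _ _ hnd]
  simp only [table_m1_by_task, table_m1_by_task_alt]
  rw [acc0_eq, scatter_inv]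
  simp only [pvTASKS, List.foldl_cons, List.foldl_nil, List.map_cons, List.map_nil,
    hp, ht, getD_pvM₁, getD_pvM₂, getD_pvM₃, getD_pvM₄, getD_pvM₅, getD_pvM₆, values_pvM,
    List.sum_cons, List.sum_nil, zero_add]
  ring_nf
  rfl
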